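-- pv_equiv track=rewrite | github.com/FieryIceStickie/AdventOfCode | src/Y2024/Day14/main.py | disp_room
-- ===== SOURCE A (Python) =====
-- def disp_room(grid: list[tuple[int, int, int, int]], t: int, w: int, h: int) -> str:
--     block = '██'
--     space = '  '
--     s = {
--         ((px + vx * t) % w, (py + vy * t) % h)
--         for px, py, vx, vy in grid
--     }
--     return '\n'.join(
--         ''.join(
--             block if (x, y) in s else space
--             for x in range(w)
--         )
--         for y in range(h)
--     )
-- ===== SOURCE B (Python) =====
-- def disp_room(grid: list[tuple[int, int, int, int]], t: int, w: int, h: int) -> str: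
--     # Sort the distinct occupied cells as flat row-major indices, then emit each
--     # line by run-length gap filling between consecutive occupied cells.
--     occ = sorted({((py + vy * t) % h) * w + (px + vx * t) % w for px, py, vx, vy in grid})
--     lines = []
--     i = 0
--     for y in range(h):
--         end = (y + 1) * w
--         prev = y * w
--         parts = []
--         while i < len(occ) and occ[i] < end:
--             parts.append('  ' * (occ[i] - prev))
--             parts.append('██')
--             prev = occ[i] + 1
--             i += 1
--         parts.append('  ' * (end - prev))
--         lines.append(''.join(parts))
--     return '\n'.join(lines)
-- ===== Notes on version B (the rewrite author's own statement) =====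
-- stated objective: alternative
-- what changed: Replaces A's per-cell set-membership scan over all w*h grid cells by sorting the distinct occupied cells as flat row-major indices and emitting each line by run-length gap filling between consecutive occupied indices.
-- outside the precondition, e.g. on disp_room([(3, 1, 0, 0)], 0, -2, 3): A returns '\n\n', B returns '██\n\n'
import Mathlib
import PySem

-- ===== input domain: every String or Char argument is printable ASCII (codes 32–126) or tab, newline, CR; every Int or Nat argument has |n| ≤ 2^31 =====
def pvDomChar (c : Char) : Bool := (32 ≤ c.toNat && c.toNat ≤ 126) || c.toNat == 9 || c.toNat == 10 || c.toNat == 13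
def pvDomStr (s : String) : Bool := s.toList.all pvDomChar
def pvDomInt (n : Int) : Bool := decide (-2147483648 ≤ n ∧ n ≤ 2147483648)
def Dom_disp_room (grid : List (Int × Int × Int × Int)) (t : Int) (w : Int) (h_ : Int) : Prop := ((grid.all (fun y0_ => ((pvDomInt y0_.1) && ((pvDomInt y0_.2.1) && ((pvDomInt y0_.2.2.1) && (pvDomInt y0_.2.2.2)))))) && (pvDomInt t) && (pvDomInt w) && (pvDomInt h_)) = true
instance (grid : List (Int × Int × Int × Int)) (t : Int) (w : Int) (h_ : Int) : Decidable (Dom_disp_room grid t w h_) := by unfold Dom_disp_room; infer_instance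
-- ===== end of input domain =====

-- B sorts the distinct occupied cells as flat row-major indices and emits each line by
-- run-length gap filling between consecutive occupied cells (alternative algorithm: no
-- per-cell membership test over the w*h grid).

-- ===== PORT A =====
def disp_room (grid : List (Int × Int × Int × Int)) (t : Int) (w : Int) (h_ : Int) : String :=
  let block := "██"
  let space := "  "
  let s : PySem.Set (Int × Int) :=
    PySem.Set.ofList (grid.map (fun r =>
      (PySem.Int.mod (r.1 + r.2.2.1 * t) w, PySem.Int.mod (r.2.1 + r.2.2.2 * t) h_)))
  PySem.Str.join "\n" ((PySem.List.pyRange 0 h_ 1).map (fun y =>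
    PySem.Str.join "" ((PySem.List.pyRange 0 w 1).map (fun x =>
      if PySem.Set.contains s (x, y) then block else space))))

-- ===== PORT B =====
-- '  ' * n : hand port of Python string repetition (exact: PySem.List.pyRepeat is list
-- repetition, empty for n ≤ 0)
def pvStrMul (s : String) (n : Int) : String := String.ofList (PySem.List.pyRepeat s.toList n)

-- the inner while loop of Source B: consume occupied flat indices below `endI`, appending a
-- gap part and a block part for each; returns (parts, prev, remaining indices)
def pvRowLoop (endI : Int) : List Int → Int → List String → List String × Int × List Int
  | [], prev, parts => (parts, prev, [])
  | c :: rest, prev, parts =>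
    if c < endI then pvRowLoop endI rest (c + 1) (parts ++ [pvStrMul "  " (c - prev), "██"])
    else (parts, prev, c :: rest)

-- one iteration of Source B's `for y in range(h)` loop, state = (lines, remaining indices)
def pvStep (w : Int) (st : List String × List Int) (y : Int) : List String × List Int :=
  let r := pvRowLoop ((y + 1) * w) st.2 (y * w) []
  (st.1 ++ [PySem.Str.join "" (r.1 ++ [pvStrMul "  " ((y + 1) * w - r.2.1)])], r.2.2)

def disp_room_alt (grid : List (Int × Int × Int × Int)) (t : Int) (w : Int) (h_ : Int) : String :=
  let occ := PySem.List.sorted (PySem.Set.ofList (grid.map (fun r =>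
      PySem.Int.mod (r.2.1 + r.2.2.2 * t) h_ * w + PySem.Int.mod (r.1 + r.2.2.1 * t) w)))
    (fun x => x)
  let st := (PySem.List.pyRange 0 h_ 1).foldl (pvStep w) ([], occ)
  PySem.Str.join "\n" st.1

-- ===== PRECONDITION & SPEC =====
-- Pre_ keeps the natural domain: empty rooms, or nonzero dimensions with a positive width
-- whenever the height is positive. It excludes w = 0 / h = 0 with robots (A raises
-- ZeroDivisionError) and the non-natural rooms with robots, negative width and positive
-- height, where A's rendering of empty lines is a negative-modulus artefact B does not
-- reproduce.
def Pre_disp_room (grid : List (Int × Int × Int × Int)) (t : Int) (w : Int) (h_ : Int) : Prop :=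
  grid = [] ∨ (w ≠ 0 ∧ h_ ≠ 0 ∧ (0 < h_ → 0 < w))
instance (grid : List (Int × Int × Int × Int)) (t : Int) (w : Int) (h_ : Int) : Decidable (Pre_disp_room grid t w h_) := by unfold Pre_disp_room; infer_instance

def pvWitness_disp_room : (List (Int × Int × Int × Int)) × Int × Int × Int := ([(0, 0, 1, 1), (2, 1, -1, 0)], 3, 4, 3)

def Spec_disp_room (grid : List (Int × Int × Int × Int)) (t : Int) (w : Int) (h_ : Int) (out : String) : Prop := out = disp_room_alt grid t w h_
instance (grid : List (Int × Int × Int × Int)) (t : Int) (w : Int) (h_ : Int) (out : String) : Decidable (Spec_disp_room grid t w h_ out) := by unfold Spec_disp_room; infer_instance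

-- ===== CLAIM (what is proved, stated in full; the proofs are below) =====
def Claim_equal_disp_room : Prop := ∀ (grid : List (Int × Int × Int × Int)) (t : Int) (w : Int) (h_ : Int), Dom_disp_room grid t w h_ → Pre_disp_room grid t w h_ → Spec_disp_room grid t w h_ (disp_room grid t w h_)

-- ===== LEMMAS AND PROOFS =====

-- Chars.join with empty separator is concatenation
theorem pvStrMul_toList (s : String) (n : Int) :
    (pvStrMul s n).toList = (List.replicate n.toNat s.toList).flatten := by
  simp [pvStrMul, PySem.List.pyRepeat, String.toList_ofList]

-- a run of all-space cells flattens to '  ' * (b - a)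
theorem pvSpaces (a b : Int) :
    (((PySem.List.pyRange a b 1).map (fun _ => ("  " : String))).map String.toList).flatten
      = (pvStrMul "  " (b - a)).toList := by
  rw [pvStrMul_toList, List.map_map]
  simp [Function.comp_def, List.map_const', PySem.List.length_pyRange_one]

theorem pvRowLoop_acc (e : Int) : ∀ (occ : List Int) (prev : Int) (parts : List String),
    pvRowLoop e occ prev parts
      = (parts ++ (pvRowLoop e occ prev []).1, (pvRowLoop e occ prev []).2)
  | [], prev, parts => by simp [pvRowLoop]
  | c :: rest, prev, parts => by
    by_cases hce : c < e
    · simp only [pvRowLoop, if_pos hce]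
      rw [pvRowLoop_acc e rest (c+1) (parts ++ [pvStrMul "  " (c - prev), "██"]),
          pvRowLoop_acc e rest (c+1) ([] ++ [pvStrMul "  " (c - prev), "██"])]
      simp
    · simp [pvRowLoop, if_neg hce]

theorem pvJoinNil_cons (p : List Char) (ps : List (List Char)) :
    PySem.Chars.join [] (p :: ps) = p ++ PySem.Chars.join [] ps := by
  cases ps with
  | nil => simp [PySem.Chars.join_singleton, PySem.Chars.join_nil]
  | cons q r => rw [PySem.Chars.join_cons_cons]; simp

theorem pvJoinNil_eq_flatten (ps : List (List Char)) :
    PySem.Chars.join [] ps = ps.flatten := by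
  induction ps with
  | nil => simp [PySem.Chars.join_nil]
  | cons p ps ih => rw [pvJoinNil_cons, ih, List.flatten_cons]

theorem pvRowLoop_spec (e : Int) : ∀ (occ : List Int) (prev : Int),
    occ.Pairwise (· < ·) → (∀ c ∈ occ, prev ≤ c) → prev ≤ e →
    ((((pvRowLoop e occ prev []).1 ++ [pvStrMul "  " (e - (pvRowLoop e occ prev []).2.1)]).map String.toList).flatten
      = (((PySem.List.pyRange prev e 1).map (fun i => if i ∈ occ then ("██" : String) else "  ")).map String.toList).flatten)
    ∧ (pvRowLoop e occ prev []).2.2 = occ.filter (fun c => decide (e ≤ c))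
  | [], prev, _, _, hpe => by
    constructor
    · simp only [pvRowLoop, List.nil_append, List.map_cons, List.map_nil, List.flatten_cons,
        List.flatten_nil, List.append_nil]
      have hconst : (PySem.List.pyRange prev e 1).map (fun i => if i ∈ ([] : List Int) then ("██" : String) else "  ")
          = (PySem.List.pyRange prev e 1).map (fun _ => ("  " : String)) := by simp
      rw [hconst, pvSpaces]
    · simp [pvRowLoop]
  | c :: rest, prev, hs, hlb, hpe => by
    by_cases hce : c < e
    · have hsrest := (List.pairwise_cons.1 hs).2
      have hhead := (List.pairwise_cons.1 hs).1
      have hlb' : ∀ c' ∈ rest, c + 1 ≤ c' := fun c' hc' => hhead c' hc'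
      have ih := pvRowLoop_spec e rest (c + 1) hsrest hlb' (by omega)
      have hpc : prev ≤ c := hlb c (by simp)
      constructor
      · simp only [pvRowLoop, if_pos hce, List.nil_append]
        rw [pvRowLoop_acc e rest (c+1) [pvStrMul "  " (c - prev), "██"]]
        simp only [List.append_assoc, List.map_append, List.flatten_append]
        have ih1 := ih.1
        simp only [List.map_append, List.flatten_append] at ih1
        rw [ih1]
        rw [PySem.List.pyRange_one_append prev c e hpc (by omega),
            PySem.List.pyRange_one_cons hce]
        simp only [List.map_append, List.flatten_append, List.map_cons, List.flatten_cons]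
        have h1 : (PySem.List.pyRange prev c 1).map (fun i => if i ∈ c :: rest then ("██" : String) else "  ")
            = (PySem.List.pyRange prev c 1).map (fun _ => ("  " : String)) := by
          apply List.map_congr_left
          intro i hi
          have hib := PySem.List.mem_pyRange_one.1 hi
          have hnm : i ∉ c :: rest := by
            intro hmem
            rcases List.mem_cons.1 hmem with h | h
            · omega
            · have := hlb' i h; omega
          simp [hnm]
        have h3 : (PySem.List.pyRange (c+1) e 1).map (fun i => if i ∈ c :: rest then ("██" : String) else "  ")
            = (PySem.List.pyRange (c+1) e 1).map (fun i => if i ∈ rest then ("██" : String) else "  ") := by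
          apply List.map_congr_left
          intro i hi
          have hib := PySem.List.mem_pyRange_one.1 hi
          have hni : i ≠ c := by omega
          simp [List.mem_cons, hni]
        rw [h1, pvSpaces, h3]
        simp
      · simp only [pvRowLoop, if_pos hce, List.nil_append]
        rw [pvRowLoop_acc e rest (c+1) [pvStrMul "  " (c - prev), "██"]]
        have hd : (decide (e ≤ c)) = false := by simp; omega
        simp only [List.filter_cons, hd, Bool.false_eq_true, if_false]
        exact ih.2
    · constructor
      · simp only [pvRowLoop, if_neg hce, List.nil_append, List.map_cons, List.map_nil,
          List.flatten_cons, List.flatten_nil, List.append_nil]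
        have hconst : (PySem.List.pyRange prev e 1).map (fun i => if i ∈ c :: rest then ("██" : String) else "  ")
            = (PySem.List.pyRange prev e 1).map (fun _ => ("  " : String)) := by
          apply List.map_congr_left
          intro i hi
          have hib := PySem.List.mem_pyRange_one.1 hi
          have hnm : i ∉ c :: rest := by
            intro hmem
            rcases List.mem_cons.1 hmem with h | h
            · omega
            · have := (List.pairwise_cons.1 hs).1 i h; omega
          simp [hnm]
        rw [hconst, pvSpaces]
      · simp only [pvRowLoop, if_neg hce]
        symm
        rw [List.filter_eq_self]
        intro a ha
        rcases List.mem_cons.1 ha with h | h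
        · simp; omega
        · have := (List.pairwise_cons.1 hs).1 a h; simp; omega

theorem pvFold_spec (w : Int) (hw : 0 < w) (occ : List Int) (hs : occ.Pairwise (· < ·)) :
    ∀ (k : Nat) (y0 : Int) (lines : List String),
    (PySem.List.pyRange y0 (y0 + k) 1).foldl (pvStep w) (lines, occ.filter (fun c => decide (y0 * w ≤ c)))
      = (lines ++ (PySem.List.pyRange y0 (y0 + k) 1).map (fun y =>
          PySem.Str.join "" ((PySem.List.pyRange (y * w) ((y + 1) * w) 1).map
            (fun i => if i ∈ occ then ("██" : String) else "  "))),
         occ.filter (fun c => decide ((y0 + k) * w ≤ c)))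
  | 0, y0, lines => by
    rw [PySem.List.pyRange_one_eq_nil (by simp)]
    simp
  | (k+1), y0, lines => by
    have hcons : PySem.List.pyRange y0 (y0 + (k+1 : Nat)) 1 = y0 :: PySem.List.pyRange (y0 + 1) (y0 + (k+1 : Nat)) 1 :=
      PySem.List.pyRange_one_cons (by push_cast; omega)
    rw [hcons, List.foldl_cons]
    -- the filtered suffix fed to this row
    set occ0 := occ.filter (fun c => decide (y0 * w ≤ c)) with hocc0
    have hs0 : occ0.Pairwise (· < ·) := hs.filter _
    have hlb0 : ∀ c ∈ occ0, y0 * w ≤ c := by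
      intro c hc
      have := (List.mem_filter.1 hc).2
      simpa using this
    have hpe : y0 * w ≤ (y0 + 1) * w := by nlinarith
    have hrow := pvRowLoop_spec ((y0 + 1) * w) occ0 (y0 * w) hs0 hlb0 hpe
    -- the emitted line equals the per-cell row (membership moved from occ0 to occ)
    have hline : PySem.Str.join "" ((pvRowLoop ((y0 + 1) * w) occ0 (y0 * w) []).1
          ++ [pvStrMul "  " ((y0 + 1) * w - (pvRowLoop ((y0 + 1) * w) occ0 (y0 * w) []).2.1)])
        = PySem.Str.join "" ((PySem.List.pyRange (y0 * w) ((y0 + 1) * w) 1).map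
            (fun i => if i ∈ occ then ("██" : String) else "  ")) := by
      apply String.toList_inj.1
      rw [PySem.Str.toList_join, PySem.Str.toList_join]
      simp only [show ("" : String).toList = ([] : List Char) from rfl]
      rw [pvJoinNil_eq_flatten, pvJoinNil_eq_flatten]
      rw [hrow.1]
      congr 2
      apply List.map_congr_left
      intro i hi
      have hib := PySem.List.mem_pyRange_one.1 hi
      have : (i ∈ occ0) = (i ∈ occ) := by
        rw [hocc0]
        simp only [List.mem_filter, eq_iff_iff, decide_eq_true_eq]
        constructor
        · exact fun h => h.1
        · exact fun h => ⟨h, by omega⟩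
      exact if_congr (by rw [this]) rfl rfl
    -- the remaining indices after this row
    have hrest : (pvRowLoop ((y0 + 1) * w) occ0 (y0 * w) []).2.2
        = occ.filter (fun c => decide ((y0 + 1) * w ≤ c)) := by
      rw [hrow.2, hocc0, List.filter_filter]
      apply List.filter_congr
      intro c _
      by_cases h : (y0 + 1) * w ≤ c
      · have : y0 * w ≤ c := by nlinarith
        simp [h, this]
      · simp [h]
    have hstep : pvStep w (lines, occ0) y0
        = (lines ++ [PySem.Str.join "" ((PySem.List.pyRange (y0 * w) ((y0 + 1) * w) 1).map
            (fun i => if i ∈ occ then ("██" : String) else "  "))],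
           occ.filter (fun c => decide ((y0 + 1) * w ≤ c))) := by
      simp only [pvStep]
      rw [hline, hrest]
    rw [hstep]
    have hshift : (y0 + ((k : Int) + 1)) = ((y0 + 1) + (k : Int)) := by ring
    have := pvFold_spec w hw occ hs k (y0 + 1)
      (lines ++ [PySem.Str.join "" ((PySem.List.pyRange (y0 * w) ((y0 + 1) * w) 1).map
        (fun i => if i ∈ occ then ("██" : String) else "  "))])
    push_cast
    push_cast at this
    rw [hshift, this]
    simp

-- with a nonpositive width every emitted line is empty
theorem pvFoldNil (w : Int) (hw : w ≤ 0) : ∀ (ys : List Int) (lines : List String),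
    (ys.foldl (pvStep w) (lines, ([] : List Int))).1 = lines ++ ys.map (fun _ => "")
  | [], lines => by simp
  | y :: ys, lines => by
    rw [List.foldl_cons]
    have hloop : pvRowLoop ((y + 1) * w) [] (y * w) [] = ([], y * w, []) := rfl
    have hline : PySem.Str.join "" (([] : List String) ++ [pvStrMul "  " ((y + 1) * w - y * w)]) = "" := by
      apply String.toList_inj.1
      rw [PySem.Str.toList_join]
      simp only [show ("" : String).toList = ([] : List Char) from rfl, List.nil_append,
        List.map_cons, List.map_nil]
      rw [PySem.Chars.join_singleton, pvStrMul_toList]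
      have : ((y + 1) * w - y * w).toNat = 0 := by
        have : (y + 1) * w - y * w = w := by ring
        omega
      rw [this]
      rfl
    have hstep : pvStep w (lines, ([] : List Int)) y = (lines ++ [""], []) := by
      simp only [pvStep, hloop]
      rw [hline]
    rw [hstep, pvFoldNil w hw ys (lines ++ [""])]
    simp

-- Str.join of the empty list is the empty string
theorem pvJoinEmpty (sep : String) : PySem.Str.join sep [] = "" := by
  apply String.toList_inj.1
  rw [PySem.Str.toList_join]
  simp [PySem.Chars.join_nil]

-- ===== VERDICT (by name: the statement is the Claim_ definition above) =====
theorem disp_room_spec : Claim_equal_disp_room := by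
  intro grid t w h_ _hdom hpre
  simp only [Spec_disp_room, disp_room, disp_room_alt]
  by_cases hh : h_ ≤ 0
  · rw [PySem.List.pyRange_one_eq_nil hh]
    simp
  · push Not at hh
    by_cases hw : 0 < w
    · -- positive width and height: the run-length machinery
      set flats := grid.map (fun r =>
        PySem.Int.mod (r.2.1 + r.2.2.2 * t) h_ * w + PySem.Int.mod (r.1 + r.2.2.1 * t) w) with hflats
      set occ := PySem.List.sorted (PySem.Set.ofList flats) (fun x => x) with hocc
      have hs : occ.Pairwise (· < ·) := PySem.List.sorted_ofList_pairwise_lt flats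
      have hmemocc : ∀ c, c ∈ occ ↔ c ∈ flats := by
        intro c
        rw [hocc, PySem.List.mem_sorted, PySem.Set.mem_ofList]
      have hnneg : ∀ c ∈ occ, 0 ≤ c := by
        intro c hc
        rcases List.mem_map.1 ((hmemocc c).1 hc) with ⟨r, _, rfl⟩
        have h1 := PySem.Int.mod_nonneg (r.2.1 + r.2.2.2 * t) hh
        have h2 := PySem.Int.mod_nonneg (r.1 + r.2.2.1 * t) hw
        nlinarith
      have hfilter : occ.filter (fun c => decide (0 * w ≤ c)) = occ := by
        rw [List.filter_eq_self]
        intro c hc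
        have := hnneg c hc
        simp
        omega
      have hfold := pvFold_spec w hw occ hs h_.toNat 0 []
      have hcast : (0 : Int) + (h_.toNat : Int) = h_ := by omega
      rw [hcast, hfilter] at hfold
      rw [hfold]
      simp only [List.nil_append]
      congr 1
      apply List.map_congr_left
      intro y hy
      have hyb := PySem.List.mem_pyRange_one.1 hy
      -- reindex the row range
      have hrange : PySem.List.pyRange (y * w) ((y + 1) * w) 1
          = (PySem.List.pyRange 0 w 1).map (fun x => y * w + x) := by
        rw [PySem.List.pyRange_one (y * w) ((y + 1) * w), PySem.List.pyRange_one 0 w]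
        have he : ((y + 1) * w - y * w) = w - 0 := by ring
        rw [he, List.map_map]
        apply List.map_congr_left
        intro k _
        simp
      rw [hrange, List.map_map]
      congr 1
      apply List.map_congr_left
      intro x hx
      have hxb := PySem.List.mem_pyRange_one.1 hx
      simp only [Function.comp_apply]
      -- membership transfer: (x, y) in the pair set ↔ y*w + x in the flat list
      have hiff : (PySem.Set.contains (PySem.Set.ofList (grid.map (fun r =>
            (PySem.Int.mod (r.1 + r.2.2.1 * t) w, PySem.Int.mod (r.2.1 + r.2.2.2 * t) h_)))) (x, y) = true)
          ↔ (y * w + x ∈ occ) := by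
        rw [PySem.Set.contains_iff, PySem.Set.mem_ofList, hmemocc, hflats]
        constructor
        · intro hm
          rcases List.mem_map.1 hm with ⟨r, hr, heq⟩
          simp only [Prod.mk.injEq] at heq
          exact List.mem_map.2 ⟨r, hr, by rw [heq.1, heq.2]⟩
        · intro hm
          rcases List.mem_map.1 hm with ⟨r, hr, heq⟩
          have hmx0 := PySem.Int.mod_nonneg (r.1 + r.2.2.1 * t) hw
          have hmxl := PySem.Int.mod_lt (r.1 + r.2.2.1 * t) hw
          have hmy0 := PySem.Int.mod_nonneg (r.2.1 + r.2.2.2 * t) hh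
          have hmyl := PySem.Int.mod_lt (r.2.1 + r.2.2.2 * t) hh
          have hy : PySem.Int.mod (r.2.1 + r.2.2.2 * t) h_ = y := by
            rcases lt_trichotomy (PySem.Int.mod (r.2.1 + r.2.2.2 * t) h_) y with h | h | h
            · exfalso
              have h1 : PySem.Int.mod (r.2.1 + r.2.2.2 * t) h_ + 1 ≤ y := h
              nlinarith
            · exact h
            · exfalso
              have h1 : y + 1 ≤ PySem.Int.mod (r.2.1 + r.2.2.2 * t) h_ := h
              nlinarith
          have hx : PySem.Int.mod (r.1 + r.2.2.1 * t) w = x := by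
            rw [hy] at heq
            omega
          exact List.mem_map.2 ⟨r, hr, by rw [hx, hy]⟩
      by_cases hc : y * w + x ∈ occ
      · rw [if_pos (hiff.2 hc), if_pos hc]
      · rw [if_neg (fun h => hc (hiff.1 h)), if_neg hc]
    · -- nonpositive width: Pre_ forces an empty grid, every line is empty
      push Not at hw
      have hgrid : grid = [] := by
        rcases hpre with h | ⟨hwne, _, himp⟩
        · exact h
        · exact absurd (himp hh) (by omega)
      subst hgrid
      have hocc : PySem.List.sorted (PySem.Set.ofList
          ((([] : List (Int × Int × Int × Int)).map (fun r =>
            PySem.Int.mod (r.2.1 + r.2.2.2 * t) h_ * w + PySem.Int.mod (r.1 + r.2.2.1 * t) w)))) (fun x => x)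
          = ([] : List Int) := by
        rw [PySem.List.sorted_eq_nil_iff]
        rfl
      simp only [List.map_nil] at hocc ⊢
      rw [hocc, pvFoldNil w hw]
      simp only [List.nil_append]
      congr 1
      apply List.map_congr_left
      intro y _
      rw [PySem.List.pyRange_one_eq_nil hw]
      simp only [List.map_nil]
      exact pvJoinEmpty ""
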